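-- pv_equiv track=rewrite | github.com/Hmzbo/Visual-Solver-Application | VisuaLLMOpti.py | remove_dup_minima
-- ===== SOURCE A (Python) =====
-- def remove_dup_minima(lst):
--     """Removes duplicate minima from a given list.
--
--     Args:
--         lst (list): The input list from which duplicate minima will be
--             removed.
--
--     Returns:
--         list: The list with duplicate minima removed.
--
--     This function iterates over the input list and checks for consecutive
--     numbers. If the count of consecutive numbers is not 2, all consecutive
--     numbers are added to the result list. If the count is 2, only the
--     first of the two consecutive numbers is added to the result list. The
--     function returns the result list with duplicate minima removed.
--
--     Example:
--         >>> remove_dup_minima([1, 2, 3, 3, 4, 5, 5, 6])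
--         [1, 2, 3, 4, 5, 6]
--     """
--
--     # Initialize an empty list to store the result
--     result = []
--     # Initialize a counter for consecutive numbers
--     consecutive_count = 1
--     # Iterate over the list using index
--     for i in range(len(lst)):
--         # Check if we're not at the last element and the next element is consecutive
--         if i + 1 < len(lst) and lst[i] + 1 == lst[i + 1]:
--             consecutive_count += 1
--         else:
--             # If the count is not 2, add all consecutive numbers
--             if consecutive_count != 2:
--                 result.extend(lst[i - consecutive_count + 1 : i + 1])
--             # If the count is 2, add only the first of the two consecutive numbers
--             else:
--                 result.append(lst[i - 1])
--             # Reset the consecutive count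
--             consecutive_count = 1
--     return result
-- ===== SOURCE B (Python) =====
-- def split_runs(lst):
--     """Partition lst into maximal runs of consecutive integers (lst[i-1]+1 == lst[i])."""
--     runs = []
--     start = 0
--     while start < len(lst):
--         end = start + 1
--         while end < len(lst) and lst[end - 1] + 1 == lst[end]:
--             end += 1
--         runs.append(lst[start:end])
--         start = end
--     return runs
--
--
-- def remove_dup_minima(lst):
--     return [x for run in split_runs(lst) for x in (run[:1] if len(run) == 2 else run)]
-- ===== Notes on version B (the rewrite author's own statement) =====
-- stated objective: simpler
-- what changed: Replaces A's single index loop with an inline consecutive-counter and slice-backtracking emission by a two-phase decomposition: first partition the list into maximal consecutive runs as explicit sublists, then flatten each run to its first element if its length is exactly 2 and to the whole run otherwise.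
import Mathlib
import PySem

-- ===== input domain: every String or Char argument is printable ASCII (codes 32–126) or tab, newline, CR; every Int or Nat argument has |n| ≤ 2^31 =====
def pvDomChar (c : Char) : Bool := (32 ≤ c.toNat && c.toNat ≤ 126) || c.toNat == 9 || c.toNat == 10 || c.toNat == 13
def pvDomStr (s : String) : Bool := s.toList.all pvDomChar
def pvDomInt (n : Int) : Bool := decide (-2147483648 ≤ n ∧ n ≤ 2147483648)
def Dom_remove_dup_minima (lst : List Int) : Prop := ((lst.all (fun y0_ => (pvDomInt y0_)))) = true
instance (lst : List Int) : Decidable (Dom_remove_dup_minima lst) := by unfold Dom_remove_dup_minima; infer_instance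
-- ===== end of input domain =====

-- B replaces A's inline counter/slice loop by a two-phase shape: partition into maximal
-- consecutive runs, then emit run[0] for length-2 runs and the whole run otherwise (objective: simpler).

-- ===== PORT A =====
-- loop body of A's 'for i in range(len(lst))': state = (result, consecutive_count)
def stepA (lst : List Int) : (List Int × Int) → Int → (List Int × Int)
  | (result, cc), i =>
    if i + 1 < (lst.length : Int) ∧
        PySem.List.pyGetD lst i 0 + 1 = PySem.List.pyGetD lst (i + 1) 0 then
      (result, cc + 1)
    else if cc ≠ 2 then
      (result ++ PySem.List.slice lst (some (i - cc + 1)) (some (i + 1)), 1)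
    else
      (result ++ [PySem.List.pyGetD lst (i - 1) 0], 1)

def remove_dup_minima (lst : List Int) : List Int :=
  ((PySem.List.pyRange 0 (lst.length : Int) 1).foldl (stepA lst) ([], 1)).1

-- ===== PORT B =====
-- inner while loop of split_runs: advance 'end' while the run continues
def runEnd (lst : List Int) (e : Nat) : Nat :=
  if e < lst.length ∧
      PySem.List.pyGetD lst ((e : Int) - 1) 0 + 1 = PySem.List.pyGetD lst (e : Int) 0 then
    runEnd lst (e + 1)
  else e
termination_by lst.length - e

theorem le_runEnd (lst : List Int) (e : Nat) : e ≤ runEnd lst e := by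
  fun_induction runEnd with
  | case1 e h ih => omega
  | case2 e h => omega

-- outer while loop of split_runs
def splitRunsFrom (lst : List Int) (start : Nat) : List (List Int) :=
  if h : start < lst.length then
    PySem.List.slice lst (some (start : Int)) (some (runEnd lst (start + 1) : Int)) ::
      splitRunsFrom lst (runEnd lst (start + 1))
  else []
termination_by lst.length - start
decreasing_by have := le_runEnd lst (start + 1); omega

def split_runs (lst : List Int) : List (List Int) := splitRunsFrom lst 0

def emitRun (run : List Int) : List Int :=
  if run.length = 2 then PySem.List.slice run none (some 1) else run

def remove_dup_minima_alt (lst : List Int) : List Int :=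
  (split_runs lst).flatMap emitRun

-- ===== PRECONDITION & SPEC =====
def Spec_remove_dup_minima (lst : List Int) (out : List Int) : Prop := out = remove_dup_minima_alt lst
instance (lst : List Int) (out : List Int) : Decidable (Spec_remove_dup_minima lst out) := by unfold Spec_remove_dup_minima; infer_instance

-- ===== CLAIM (what is proved, stated in full; the proofs are below) =====
def Claim_equal_remove_dup_minima : Prop := ∀ (lst : List Int), Dom_remove_dup_minima lst → Spec_remove_dup_minima lst (remove_dup_minima lst)

-- ===== LEMMAS AND PROOFS =====

-- indexing / slicing an append at an offset past the prefix
theorem pyGetD_append (pre rest : List Int) (j : Nat) (d : Int) :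
    PySem.List.pyGetD (pre ++ rest) ((pre.length + j : Nat) : Int) d
      = PySem.List.pyGetD rest (j : Int) d := by
  rw [PySem.List.pyGetD_natCast, PySem.List.pyGetD_natCast]
  simp [List.getD_eq_getElem?_getD, List.getElem?_append_right]

theorem slice_append (pre rest : List Int) (a b : Nat) :
    PySem.List.slice (pre ++ rest) (some ((pre.length + a : Nat) : Int))
        (some ((pre.length + b : Nat) : Int))
      = PySem.List.slice rest (some (a : Int)) (some (b : Int)) := by
  rw [PySem.List.slice_natCast, PySem.List.slice_natCast, List.drop_append]
  rw [List.drop_eq_nil_of_le (by omega), List.nil_append]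
  have h1 : pre.length + a - pre.length = a := by omega
  have h2 : pre.length + b - (pre.length + a) = b - a := by omega
  rw [h1, h2]

-- facts about runEnd
theorem runEnd_le (lst : List Int) (e : Nat) (h : e ≤ lst.length) :
    runEnd lst e ≤ lst.length := by
  fun_induction runEnd with
  | case1 e h' ih => exact ih (by omega)
  | case2 e h' => exact h

theorem runEnd_prop (lst : List Int) (e : Nat) :
    ∀ t : Nat, e ≤ t → t < runEnd lst e →
      t < lst.length ∧
        PySem.List.pyGetD lst ((t : Int) - 1) 0 + 1 = PySem.List.pyGetD lst (t : Int) 0 := by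
  fun_induction runEnd with
  | case1 e h ih =>
      intro t ht1 ht2
      rcases Nat.eq_or_lt_of_le ht1 with rfl | hlt
      · exact ⟨h.1, h.2⟩
      · exact ih t hlt ht2
  | case2 e h =>
      intro t ht1 ht2
      omega

theorem runEnd_stop (lst : List Int) (e : Nat) :
    ¬ (runEnd lst e < lst.length ∧
        PySem.List.pyGetD lst ((runEnd lst e : Int) - 1) 0 + 1
          = PySem.List.pyGetD lst (runEnd lst e : Int) 0) := by
  fun_induction runEnd with
  | case1 e h ih => exact ih
  | case2 e h => exact h

theorem runEnd_append (pre rest : List Int) :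
    ∀ fuel j : Nat, rest.length + 1 - j ≤ fuel → 1 ≤ j →
      runEnd (pre ++ rest) (pre.length + j) = pre.length + runEnd rest j := by
  intro fuel
  induction fuel with
  | zero =>
      intro j hf hj
      have hL : runEnd (pre ++ rest) (pre.length + j) = pre.length + j := by
        rw [runEnd.eq_def, if_neg]
        rintro ⟨h1, -⟩
        rw [List.length_append] at h1; omega
      have hR : runEnd rest j = j := by
        rw [runEnd.eq_def, if_neg]
        rintro ⟨h1, -⟩; omega
      rw [hL, hR]
  | succ n ih =>
      intro j hf hj
      have e1 : ((pre.length + j : Nat) : Int) - 1 = ((pre.length + (j - 1) : Nat) : Int) := by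
        push_cast; omega
      have e2 : ((j - 1 : Nat) : Int) = (j : Int) - 1 := by push_cast; omega
      by_cases hc : j < rest.length ∧
          PySem.List.pyGetD rest ((j : Int) - 1) 0 + 1 = PySem.List.pyGetD rest (j : Int) 0
      · have hR : runEnd rest j = runEnd rest (j + 1) := by
          rw [runEnd.eq_def, if_pos hc]
        have hL : runEnd (pre ++ rest) (pre.length + j)
            = runEnd (pre ++ rest) (pre.length + j + 1) := by
          rw [runEnd.eq_def, if_pos]
          constructor
          · rw [List.length_append]; omega
          · rw [e1, pyGetD_append, pyGetD_append, e2]; exact hc.2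
        rw [hL, hR]
        have e3 : pre.length + j + 1 = pre.length + (j + 1) := rfl
        rw [e3, ih (j + 1) (by omega) (by omega)]
      · have hR : runEnd rest j = j := by rw [runEnd.eq_def, if_neg hc]
        have hL : runEnd (pre ++ rest) (pre.length + j) = pre.length + j := by
          rw [runEnd.eq_def, if_neg]
          rintro ⟨h1, h2⟩
          apply hc
          constructor
          · rw [List.length_append] at h1; omega
          · rw [e1, pyGetD_append, pyGetD_append, e2] at h2; exact h2
        rw [hL, hR]

theorem splitRunsFrom_append (pre rest : List Int) :
    ∀ fuel s : Nat, rest.length - s ≤ fuel →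
      splitRunsFrom (pre ++ rest) (pre.length + s) = splitRunsFrom rest s := by
  intro fuel
  induction fuel with
  | zero =>
      intro s hf
      have hL : splitRunsFrom (pre ++ rest) (pre.length + s) = [] := by
        rw [splitRunsFrom.eq_def, dif_neg]
        rw [List.length_append]; omega
      have hR : splitRunsFrom rest s = [] := by
        rw [splitRunsFrom.eq_def, dif_neg]; omega
      rw [hL, hR]
  | succ n ih =>
      intro s hf
      by_cases hs : s < rest.length
      · have h1 : s + 1 ≤ runEnd rest (s + 1) := le_runEnd rest (s + 1)
        have h2 : runEnd rest (s + 1) ≤ rest.length := runEnd_le rest (s + 1) (by omega)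
        have hre : runEnd (pre ++ rest) (pre.length + s + 1)
            = pre.length + runEnd rest (s + 1) := by
          have e3 : pre.length + s + 1 = pre.length + (s + 1) := rfl
          rw [e3]
          exact runEnd_append pre rest (rest.length + 1) (s + 1) (by omega) (by omega)
        have hL : splitRunsFrom (pre ++ rest) (pre.length + s)
            = PySem.List.slice rest (some (s : Int)) (some (runEnd rest (s + 1) : Int)) ::
                splitRunsFrom (pre ++ rest) (pre.length + runEnd rest (s + 1)) := by
          rw [splitRunsFrom.eq_def, dif_pos (by rw [List.length_append]; omega :
            pre.length + s < (pre ++ rest).length)]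
          rw [hre, slice_append pre rest s (runEnd rest (s + 1))]
        have hR : splitRunsFrom rest s
            = PySem.List.slice rest (some (s : Int)) (some (runEnd rest (s + 1) : Int)) ::
                splitRunsFrom rest (runEnd rest (s + 1)) := by
          rw [splitRunsFrom.eq_def, dif_pos hs]
        rw [hL, hR, ih (runEnd rest (s + 1)) (by omega)]
      · have hL : splitRunsFrom (pre ++ rest) (pre.length + s) = [] := by
          rw [splitRunsFrom.eq_def, dif_neg]
          rw [List.length_append]; omega
        have hR : splitRunsFrom rest s = [] := by
          rw [splitRunsFrom.eq_def, dif_neg hs]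
        rw [hL, hR]

-- the second component of A's loop state either increments or resets to 1
theorem stepA_snd (lst : List Int) (res : List Int) (c : Int) (i : Int) :
    (stepA lst (res, c) i).2 = c + 1 ∨ (stepA lst (res, c) i).2 = 1 := by
  simp only [stepA]; split_ifs <;> simp

-- A's loop step only appends to the result component
theorem stepA_res (lst : List Int) (res r : List Int) (c : Int) (i : Int) :
    stepA lst (res ++ r, c) i = (res ++ (stepA lst (r, c) i).1, (stepA lst (r, c) i).2) := by
  simp only [stepA]; split_ifs <;> simp

theorem foldl_res (lst : List Int) :
    ∀ (L : List Int) (res r : List Int) (c : Int),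
      L.foldl (stepA lst) (res ++ r, c)
        = (res ++ (L.foldl (stepA lst) (r, c)).1, (L.foldl (stepA lst) (r, c)).2) := by
  intro L
  induction L with
  | nil => intro res r c; simp
  | cons i L ih =>
      intro res r c
      rcases h : stepA lst (r, c) i with ⟨r', c'⟩
      simp only [List.foldl_cons, stepA_res, h, ih]

-- A's step on a shifted index of an append equals the step on the suffix
theorem stepA_shift (pre rest : List Int) (j : Nat) (res : List Int) (cc : Int)
    (h1 : 1 ≤ cc) (h2 : cc ≤ (j : Int) + 1) :
    stepA (pre ++ rest) (res, cc) ((pre.length + j : Nat) : Int)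
      = stepA rest (res, cc) ((j : Nat) : Int) := by
  obtain ⟨c, rfl⟩ : ∃ c : Nat, cc = (c : Int) := ⟨cc.toNat, by omega⟩
  have hc1 : 1 ≤ c := by exact_mod_cast h1
  have hc2 : c ≤ j + 1 := by exact_mod_cast h2
  have e1 : ((pre.length + j : Nat) : Int) + 1 = ((pre.length + (j + 1) : Nat) : Int) := by
    push_cast; ring
  have e2 : ((j : Nat) : Int) + 1 = ((j + 1 : Nat) : Int) := by push_cast; ring
  simp only [stepA]
  have hcond : (((pre.length + j : Nat) : Int) + 1 < ((pre ++ rest).length : Int) ∧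
      PySem.List.pyGetD (pre ++ rest) ((pre.length + j : Nat) : Int) 0 + 1
        = PySem.List.pyGetD (pre ++ rest) (((pre.length + j : Nat) : Int) + 1) 0) ↔
      (((j : Nat) : Int) + 1 < (rest.length : Int) ∧
      PySem.List.pyGetD rest ((j : Nat) : Int) 0 + 1
        = PySem.List.pyGetD rest (((j : Nat) : Int) + 1) 0) := by
    rw [e1, e2, pyGetD_append, pyGetD_append, List.length_append]
    constructor
    · rintro ⟨ha, hb⟩; exact ⟨by push_cast at ha ⊢; omega, hb⟩
    · rintro ⟨ha, hb⟩; exact ⟨by push_cast at ha ⊢; omega, hb⟩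
  by_cases hcnd : ((j : Nat) : Int) + 1 < (rest.length : Int) ∧
      PySem.List.pyGetD rest ((j : Nat) : Int) 0 + 1
        = PySem.List.pyGetD rest (((j : Nat) : Int) + 1) 0
  · rw [if_pos (hcond.mpr hcnd), if_pos hcnd]
  · rw [if_neg (fun h => hcnd (hcond.mp h)), if_neg hcnd]
    by_cases hc2' : ((c : Nat) : Int) ≠ 2
    · rw [if_pos hc2', if_pos hc2']
      have ea : ((pre.length + j : Nat) : Int) - ((c : Nat) : Int) + 1
          = ((pre.length + (j + 1 - c) : Nat) : Int) := by push_cast; omega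
      have eb : ((j : Nat) : Int) - ((c : Nat) : Int) + 1 = ((j + 1 - c : Nat) : Int) := by
        push_cast; omega
      rw [ea, e1, eb, e2, slice_append]
    · rw [if_neg hc2', if_neg hc2']
      have hcc : c = 2 := by omega
      have hj1 : 1 ≤ j := by omega
      have ea : ((pre.length + j : Nat) : Int) - 1 = ((pre.length + (j - 1) : Nat) : Int) := by
        push_cast; omega
      have eb : ((j - 1 : Nat) : Int) = ((j : Nat) : Int) - 1 := by push_cast; omega
      rw [ea, pyGetD_append, eb]

-- A's fold over the shifted index range of an append equals the fold over the suffix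
theorem fold_shift (pre rest : List Int) :
    ∀ fuel j : Nat, ∀ (res : List Int) (cc : Int), rest.length - j ≤ fuel →
      1 ≤ cc → cc ≤ (j : Int) + 1 →
      (PySem.List.pyRange ((pre.length + j : Nat) : Int) (((pre ++ rest).length : Nat) : Int)
          1).foldl (stepA (pre ++ rest)) (res, cc)
        = (PySem.List.pyRange ((j : Nat) : Int) ((rest.length : Nat) : Int) 1).foldl
            (stepA rest) (res, cc) := by
  intro fuel
  induction fuel with
  | zero =>
      intro j res cc hf h1 h2
      have hn1 : ((pre ++ rest).length : Int) ≤ ((pre.length + j : Nat) : Int) := by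
        simp only [List.length_append]; push_cast; omega
      have hn2 : ((rest.length : Nat) : Int) ≤ ((j : Nat) : Int) := by push_cast; omega
      rw [PySem.List.pyRange_one_eq_nil hn1, PySem.List.pyRange_one_eq_nil hn2]
      rfl
  | succ n ih =>
      intro j res cc hf h1 h2
      by_cases hj : j < rest.length
      · have hlt1 : ((pre.length + j : Nat) : Int) < ((pre ++ rest).length : Int) := by
          simp only [List.length_append]; push_cast; omega
        have hlt2 : ((j : Nat) : Int) < ((rest.length : Nat) : Int) := by push_cast; omega
        rw [PySem.List.pyRange_one_cons hlt1, PySem.List.pyRange_one_cons hlt2,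
          List.foldl_cons, List.foldl_cons, stepA_shift pre rest j res cc h1 h2]
        rcases hst : stepA rest (res, cc) ((j : Nat) : Int) with ⟨r', c'⟩
        have hc' : 1 ≤ c' ∧ c' ≤ ((j + 1 : Nat) : Int) + 1 := by
          have hsnd := stepA_snd rest res cc ((j : Nat) : Int)
          rw [hst] at hsnd
          rcases hsnd with h | h <;> simp at h <;> push_cast <;> omega
        have e1 : ((pre.length + j : Nat) : Int) + 1 = ((pre.length + (j + 1) : Nat) : Int) := by
          push_cast; ring
        have e2 : ((j : Nat) : Int) + 1 = ((j + 1 : Nat) : Int) := by push_cast; ring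
        rw [e1, e2]
        exact ih (j + 1) r' c' (by omega) hc'.1 hc'.2
      · have hn1 : ((pre ++ rest).length : Int) ≤ ((pre.length + j : Nat) : Int) := by
          simp only [List.length_append]; push_cast; omega
        have hn2 : ((rest.length : Nat) : Int) ≤ ((j : Nat) : Int) := by push_cast; omega
        rw [PySem.List.pyRange_one_eq_nil hn1, PySem.List.pyRange_one_eq_nil hn2]
        rfl

-- A's fold across the first maximal run emits exactly B's emitRun of that run
theorem fold_run (lst : List Int) (hne : lst ≠ []) :
    ∀ fuel s : Nat, ∀ res : List Int, runEnd lst 1 - s ≤ fuel → s < runEnd lst 1 →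
      (PySem.List.pyRange ((s : Nat) : Int) ((runEnd lst 1 : Nat) : Int) 1).foldl
          (stepA lst) (res, (s : Int) + 1)
        = (res ++ emitRun (lst.take (runEnd lst 1)), 1) := by
  have hNpos : 0 < lst.length := List.length_pos_iff.mpr hne
  have hr1 : 1 ≤ runEnd lst 1 := le_runEnd lst 1
  have hrN : runEnd lst 1 ≤ lst.length := runEnd_le lst 1 hNpos
  intro fuel
  induction fuel with
  | zero => intro s res hf hs; omega
  | succ n ih =>
      intro s res hf hs
      have hlt : ((s : Nat) : Int) < ((runEnd lst 1 : Nat) : Int) := by push_cast; omega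
      rw [PySem.List.pyRange_one_cons hlt, List.foldl_cons]
      by_cases hlast : s + 1 < runEnd lst 1
      · -- interior of the run: the consecutive test succeeds
        have hp := (runEnd_prop lst 1 (s + 1) (by omega) hlast).2
        have e1 : ((s + 1 : Nat) : Int) - 1 = (s : Int) := by push_cast; omega
        have e2 : ((s + 1 : Nat) : Int) = (s : Int) + 1 := by push_cast; ring
        rw [e1, e2] at hp
        have hcond : (s : Int) + 1 < (lst.length : Int) ∧
            PySem.List.pyGetD lst (s : Int) 0 + 1 = PySem.List.pyGetD lst ((s : Int) + 1) 0 :=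
          ⟨by push_cast; omega, hp⟩
        have hstep : stepA lst (res, (s : Int) + 1) ((s : Nat) : Int)
            = (res, ((s + 1 : Nat) : Int) + 1) := by
          simp only [stepA]
          rw [if_pos hcond]
          rw [e2]
        rw [hstep]
        have e3 : ((s : Nat) : Int) + 1 = ((s + 1 : Nat) : Int) := by push_cast; ring
        rw [e3]
        have := ih (s + 1) res (by omega) hlast
        rw [e2] at this
        exact this
      · -- last index of the run: the consecutive test fails, A emits
        have hsr : s + 1 = runEnd lst 1 := by omega
        have hstop := runEnd_stop lst 1
        have hcond : ¬ ((s : Int) + 1 < (lst.length : Int) ∧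
            PySem.List.pyGetD lst (s : Int) 0 + 1 = PySem.List.pyGetD lst ((s : Int) + 1) 0) := by
          rintro ⟨ha, hb⟩
          apply hstop
          constructor
          · push_cast at ha; omega
          · have e1 : ((runEnd lst 1 : Nat) : Int) - 1 = (s : Int) := by push_cast; omega
            have e2 : ((runEnd lst 1 : Nat) : Int) = (s : Int) + 1 := by push_cast; omega
            rw [e1, e2]; exact hb
        have etail : PySem.List.pyRange (((s : Nat) : Int) + 1) ((runEnd lst 1 : Nat) : Int) 1
            = [] := PySem.List.pyRange_one_eq_nil (by push_cast; omega)
        rw [etail, List.foldl_nil]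
        by_cases h2 : runEnd lst 1 = 2
        · -- a run of length exactly 2: A appends lst[i-1], B emits run[:1]
          have hs1 : s = 1 := by omega
          subst hs1
          obtain ⟨a, b, tl, rfl⟩ : ∃ a b tl, lst = a :: b :: tl := by
            match lst, hne with
            | [x], _ => exfalso; simp at hrN; omega
            | x :: y :: t, _ => exact ⟨x, y, t, rfl⟩
          have hstep : stepA (a :: b :: tl) (res, ((1 : Nat) : Int) + 1) ((1 : Nat) : Int)
              = (res ++ [a], 1) := by
            simp only [stepA]
            rw [if_neg hcond, if_neg (by norm_num : ¬(((1 : Nat) : Int) + 1 ≠ 2))]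
            norm_num
          rw [hstep, h2]
          have hemit : emitRun (List.take 2 (a :: b :: tl)) = [a] := by
            show emitRun [a, b] = [a]
            have hsl : PySem.List.slice [a, b] none (some 1) = [a] := by
              rw [show (1 : Int) = ((1 : Nat) : Int) from rfl, PySem.List.slice_to_natCast]
              rfl
            simp [emitRun, hsl]
          rw [hemit]
        · -- a run of another length: A extends with the whole run slice
          have hne2 : ((s : Int) + 1 ≠ 2) := by
            intro h; rw [show ((s : Int) + 1 = ((s + 1 : Nat) : Int)) by push_cast; ring] at h
            have : s + 1 = 2 := by exact_mod_cast h
            omega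
          have hstep : stepA lst (res, (s : Int) + 1) ((s : Nat) : Int)
              = (res ++ lst.take (runEnd lst 1), 1) := by
            simp only [stepA]
            rw [if_neg hcond, if_pos hne2]
            have ea : (s : Int) - ((s : Int) + 1) + 1 = ((0 : Nat) : Int) := by push_cast; ring
            have eb : (s : Int) + 1 = ((runEnd lst 1 : Nat) : Int) := by push_cast; omega
            rw [ea, eb, PySem.List.slice_natCast, List.drop_zero, Nat.sub_zero]
          rw [hstep]
          have hemit : emitRun (lst.take (runEnd lst 1)) = lst.take (runEnd lst 1) := by
            unfold emitRun
            rw [if_neg]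
            rw [List.length_take]; omega
          rw [hemit]

-- base case: both programs return [] on []
theorem both_nil : remove_dup_minima ([] : List Int) = remove_dup_minima_alt ([] : List Int) := by
  unfold remove_dup_minima remove_dup_minima_alt split_runs
  rw [splitRunsFrom.eq_def]
  simp [PySem.List.pyRange_one_eq_nil]

theorem main_equiv : ∀ n lst, lst.length ≤ n → remove_dup_minima lst = remove_dup_minima_alt lst := by
  intro n
  induction n with
  | zero =>
      intro lst h
      have : lst = [] := List.length_eq_zero_iff.mp (by omega)
      subst this; exact both_nil
  | succ n ih =>
      intro lst hlen
      rcases eq_or_ne lst [] with rfl | hne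
      · exact both_nil
      · have hNpos : 0 < lst.length := List.length_pos_iff.mpr hne
        have hr1 : 1 ≤ runEnd lst 1 := le_runEnd lst 1
        have hrN : runEnd lst 1 ≤ lst.length := runEnd_le lst 1 hNpos
        unfold remove_dup_minima
        have h0r : (0 : Int) ≤ ((runEnd lst 1 : Nat) : Int) := by positivity
        have hrN' : ((runEnd lst 1 : Nat) : Int) ≤ (lst.length : Int) := by push_cast; omega
        rw [PySem.List.pyRange_one_append 0 ((runEnd lst 1 : Nat) : Int) (lst.length : Int)
          h0r hrN', List.foldl_append]
        have h1 := fold_run lst hne (runEnd lst 1) 0 [] (by omega) (by omega)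
        simp only [Nat.cast_zero, zero_add, List.nil_append] at h1
        rw [h1]
        -- shift the remaining fold onto the dropped suffix
        have hklen : (lst.take (runEnd lst 1)).length = runEnd lst 1 := by
          rw [List.length_take]; omega
        have hshift := fold_shift (lst.take (runEnd lst 1)) (lst.drop (runEnd lst 1))
          ((lst.drop (runEnd lst 1)).length) 0 (emitRun (lst.take (runEnd lst 1))) 1
          (by omega) (by norm_num) (by norm_num)
        rw [List.take_append_drop] at hshift
        have e6 : (lst.take (runEnd lst 1)).length + 0 = runEnd lst 1 := by omega
        rw [e6] at hshift
        simp only [Nat.cast_zero] at hshift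
        rw [hshift]
        have hres := foldl_res (lst.drop (runEnd lst 1))
          (PySem.List.pyRange 0 (((lst.drop (runEnd lst 1)).length : Nat) : Int) 1)
          (emitRun (lst.take (runEnd lst 1))) [] 1
        simp only [List.append_nil] at hres
        rw [hres]
        dsimp only
        have hAdrop : ((PySem.List.pyRange 0 (((lst.drop (runEnd lst 1)).length : Nat) : Int)
            1).foldl (stepA (lst.drop (runEnd lst 1))) ([], 1)).1
            = remove_dup_minima (lst.drop (runEnd lst 1)) := rfl
        rw [hAdrop, ih (lst.drop (runEnd lst 1)) (by rw [List.length_drop]; omega)]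
        -- unfold B on the full list: its first run is exactly lst.take (runEnd lst 1)
        show emitRun (lst.take (runEnd lst 1)) ++ remove_dup_minima_alt (lst.drop (runEnd lst 1))
          = remove_dup_minima_alt lst
        conv_rhs => rw [remove_dup_minima_alt, split_runs, splitRunsFrom.eq_def]
        rw [dif_pos hNpos, List.flatMap_cons]
        have hsl : PySem.List.slice lst (some ((0 : Nat) : Int))
            (some ((runEnd lst (0 + 1) : Nat) : Int)) = lst.take (runEnd lst 1) := by
          rw [PySem.List.slice_natCast, List.drop_zero, Nat.sub_zero]
        rw [hsl]
        congr 1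
        have hsp := splitRunsFrom_append (lst.take (runEnd lst 1)) (lst.drop (runEnd lst 1))
          ((lst.drop (runEnd lst 1)).length) 0 (by omega)
        rw [List.take_append_drop] at hsp
        rw [e6] at hsp
        show remove_dup_minima_alt (lst.drop (runEnd lst 1))
          = (splitRunsFrom lst (runEnd lst (0 + 1))).flatMap emitRun
        rw [show (0 + 1 : Nat) = 1 from rfl, hsp]
        rfl

-- ===== VERDICT (by name: the statement is the Claim_ definition above) =====
theorem remove_dup_minima_spec : Claim_equal_remove_dup_minima := by
  intro lst _
  unfold Spec_remove_dup_minima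
  exact main_equiv lst.length lst le_rfl
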